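-- pv_equiv track=rewrite | github.com/kabomekgwe/gospel-keys | backend/app/core/arrangers/voice_leading_engine.py | find_closest_voicing
-- ===== SOURCE A (Python) =====
-- from typing import List, Optional
--
-- def find_closest_voicing(
--     chord_tones: List[int],
--     previous_voicing: Optional[List[int]] = None,
--     max_movement: Optional[int] = None,
--     allow_wide_voicings: bool = True
-- ) -> List[int]:
--     """Find the chord inversion that minimizes voice movement.
--
--     Universal voice leading algorithm used across all genres.
--     Generates all possible inversions (root, 1st, 2nd, etc.) within +/- 1 octave
--     and selects the one with minimum total voice movement.
--
--     Args:
--         chord_tones: Root position chord tones (MIDI note numbers)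
--         previous_voicing: Previous chord's voicing for smooth voice leading
--         max_movement: Maximum allowed semitones per voice (None = unlimited)
--                      Classical: 7 (perfect 5th), Jazz: 12 (octave), Gospel: 10
--         allow_wide_voicings: If True, try octave variations (jazz, neo-soul)
--                             If False, stay closer (classical, gospel ballads)
--
--     Returns:
--         Best inversion for smooth voice leading
--
--     Example:
--         >>> # Cmaj7 to Dm7 voice leading
--         >>> cmaj7 = [48, 52, 55, 59]  # C, E, G, B (root position)
--         >>> dm7 = [50, 53, 57, 60]    # D, F, A, C (root position)
--         >>> best_dm7 = find_closest_voicing(dm7, previous_voicing=cmaj7)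
--         >>> # Returns optimal inversion with minimal movement from Cmaj7
--     """
--     if not previous_voicing:
--         return chord_tones
--
--     # Generate all possible inversions within +/- 1 octave
--     inversions = []
--
--     # Add root position and inversions by rotating chord tones
--     for rotation in range(len(chord_tones)):
--         inversion = chord_tones[rotation:] + chord_tones[:rotation]
--         inversions.append(inversion)
--
--         # Also try octave up/down for each inversion (if allowed)
--         if allow_wide_voicings:
--             inversions.append([n + 12 for n in inversion])
--             inversions.append([n - 12 for n in inversion])
--
--     # Find inversion with minimum total movement
--     best_inversion = chord_tones
--     min_movement = float('inf')
--
--     for inversion in inversions: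
--         # Calculate total movement (sum of distances between voices)
--         movement = 0
--
--         # Compare each note in current chord to closest note in previous
--         for note in inversion:
--             if previous_voicing:
--                 # Find closest note in previous voicing
--                 closest_distance = min(abs(note - prev_note) for prev_note in previous_voicing)
--                 movement += closest_distance
--
--         # Check max_movement constraint (if specified)
--         if max_movement is not None:
--             # Calculate max individual voice movement in this inversion
--             max_individual_movement = max(
--                 min(abs(note - prev_note) for prev_note in previous_voicing)
--                 for note in inversion
--             )
--             if max_individual_movement > max_movement:
--                 continue  # Skip this inversion
--
--         if movement < min_movement:
--             min_movement = movement
--             best_inversion = inversion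
--
--     return best_inversion
-- ===== SOURCE B (Python) =====
-- from typing import List, Optional
--
-- def find_closest_voicing(
--     chord_tones: List[int],
--     previous_voicing: Optional[List[int]] = None,
--     max_movement: Optional[int] = None,
--     allow_wide_voicings: bool = True
-- ) -> List[int]:
--     """Exact re-implementation: every rotation of the chord has the same
--     multiset of notes, so total/maximum movement is identical for all rotations;
--     only the three octave offsets (0, +12, -12) can differ, and the first
--     inversion A would pick at the winning offset is rotation 0, i.e. the chord
--     itself shifted.  So evaluate just the offsets, in A's priority order."""
--     if not previous_voicing:
--         return chord_tones
--
--     offsets = [0, 12, -12] if allow_wide_voicings else [0]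
--
--     best = chord_tones
--     best_movement = None  # None = +infinity (no candidate accepted yet)
--     for off in offsets:
--         dists = [min(abs(n + off - p) for p in previous_voicing) for n in chord_tones]
--         if max_movement is not None and dists and max(dists) > max_movement:
--             continue
--         movement = sum(dists)
--         if best_movement is None or movement < best_movement:
--             best_movement = movement
--             best = [n + off for n in chord_tones]
--     return best
-- ===== Notes on version B (the rewrite author's own statement) =====
-- stated objective: alternative
-- what changed: All rotations of the chord share one multiset of notes, so total and maximum movement depend only on the octave offset; B evaluates just the three octave offsets (unshifted, an octave up, an octave down) in A's priority order instead of all rotated inversions with a nested scan.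
import Mathlib
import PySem

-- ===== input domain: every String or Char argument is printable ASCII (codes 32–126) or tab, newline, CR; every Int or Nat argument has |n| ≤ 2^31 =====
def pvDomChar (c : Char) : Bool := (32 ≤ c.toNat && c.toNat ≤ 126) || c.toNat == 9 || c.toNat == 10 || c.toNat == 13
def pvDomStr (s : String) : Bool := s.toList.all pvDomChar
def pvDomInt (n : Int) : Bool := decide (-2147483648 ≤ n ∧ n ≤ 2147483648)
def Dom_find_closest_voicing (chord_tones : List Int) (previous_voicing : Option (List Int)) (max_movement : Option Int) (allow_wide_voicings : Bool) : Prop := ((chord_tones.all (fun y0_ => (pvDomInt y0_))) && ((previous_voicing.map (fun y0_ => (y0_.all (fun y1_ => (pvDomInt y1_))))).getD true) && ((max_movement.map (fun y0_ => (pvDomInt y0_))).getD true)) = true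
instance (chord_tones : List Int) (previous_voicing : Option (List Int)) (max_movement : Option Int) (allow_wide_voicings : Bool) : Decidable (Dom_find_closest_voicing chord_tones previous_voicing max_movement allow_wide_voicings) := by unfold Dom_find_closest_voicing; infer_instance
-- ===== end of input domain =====

-- B replaces A's scan over all rotated inversions by a scan over the three octave
-- offsets only (all rotations share one multiset of notes, so movement is the same).

-- ===== PORT A =====
-- abs(x)
def pvAbs (x : Int) : Int := if x < 0 then -x else x

-- min(abs(note - prev_note) for prev_note in prev); [] is unreachable in both programs
def minDist (note : Int) (prev : List Int) : Int :=
  match prev with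
  | [] => 0
  | p :: ps => ps.foldl (fun acc q => min acc (pvAbs (note - q))) (pvAbs (note - p))

-- Python's max() of a list; [] is unreachable in both programs
def maxNE (l : List Int) : Int :=
  match l with
  | [] => 0
  | d :: ds => ds.foldl max d

-- body of A's `for inversion in inversions` loop; state = (best_inversion, min_movement),
-- none playing float('inf')
def fcvStep (prev : List Int) (max_movement : Option Int) (st : List Int × Option Int) (inv : List Int) : List Int × Option Int :=
  let movement := inv.foldl (fun m note => if prev = [] then m else m + minDist note prev) 0
  let skip : Bool :=
    match max_movement with
    | some mm => decide (mm < maxNE (inv.map (fun note => minDist note prev)))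
    | none => false
  if skip then st
  else
    match st.2 with
    | none => (inv, some movement)
    | some mv => if movement < mv then (inv, some movement) else st

-- body of A's `for rotation in range(len(chord_tones))` loop building `inversions`
def fcvAddInversions (chord_tones : List Int) (allow_wide_voicings : Bool) (acc : List (List Int)) (r : Int) : List (List Int) :=
  let inversion := PySem.List.slice chord_tones (some r) none ++ PySem.List.slice chord_tones none (some r)
  let acc2 := acc ++ [inversion]
  if allow_wide_voicings then
    (acc2 ++ [inversion.map (fun n => n + 12)]) ++ [inversion.map (fun n => n - 12)]
  else acc2

def find_closest_voicing (chord_tones : List Int) (previous_voicing : Option (List Int)) (max_movement : Option Int) (allow_wide_voicings : Bool) : List Int :=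
  match previous_voicing with
  | none => chord_tones
  | some prev =>
    if prev = [] then chord_tones
    else
      let inversions := (PySem.List.pyRange 0 (chord_tones.length : Int)).foldl
        (fcvAddInversions chord_tones allow_wide_voicings) []
      (inversions.foldl (fcvStep prev max_movement) (chord_tones, none)).1

-- ===== PORT B =====
-- body of B's `for off in offsets` loop; same state shape
def fcvAltStep (chord_tones prev : List Int) (max_movement : Option Int) (st : List Int × Option Int) (off : Int) : List Int × Option Int :=
  let dists := chord_tones.map (fun n => minDist (n + off) prev)
  let skip : Bool :=
    match max_movement with
    | some mm => !dists.isEmpty && decide (mm < maxNE dists)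
    | none => false
  if skip then st
  else
    let movement := dists.sum
    match st.2 with
    | none => (chord_tones.map (fun n => n + off), some movement)
    | some mv => if movement < mv then (chord_tones.map (fun n => n + off), some movement) else st

def find_closest_voicing_alt (chord_tones : List Int) (previous_voicing : Option (List Int)) (max_movement : Option Int) (allow_wide_voicings : Bool) : List Int :=
  match previous_voicing with
  | none => chord_tones
  | some prev =>
    if prev = [] then chord_tones
    else
      let offsets : List Int := if allow_wide_voicings then [0, 12, -12] else [0]
      (offsets.foldl (fcvAltStep chord_tones prev max_movement) (chord_tones, none)).1

-- ===== PRECONDITION & SPEC =====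
def Spec_find_closest_voicing (chord_tones : List Int) (previous_voicing : Option (List Int)) (max_movement : Option Int) (allow_wide_voicings : Bool) (out : List Int) : Prop := out = find_closest_voicing_alt chord_tones previous_voicing max_movement allow_wide_voicings
instance (chord_tones : List Int) (previous_voicing : Option (List Int)) (max_movement : Option Int) (allow_wide_voicings : Bool) (out : List Int) : Decidable (Spec_find_closest_voicing chord_tones previous_voicing max_movement allow_wide_voicings out) := by unfold Spec_find_closest_voicing; infer_instance

-- ===== CLAIM (what is proved, stated in full; the proofs are below) =====
def Claim_equal_find_closest_voicing : Prop := ∀ (chord_tones : List Int) (previous_voicing : Option (List Int)) (max_movement : Option Int) (allow_wide_voicings : Bool), Dom_find_closest_voicing chord_tones previous_voicing max_movement allow_wide_voicings → Spec_find_closest_voicing chord_tones previous_voicing max_movement allow_wide_voicings (find_closest_voicing chord_tones previous_voicing max_movement allow_wide_voicings)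

-- ===== LEMMAS AND PROOFS =====

-- A's skip test, as a standalone Boolean
def skipB (prev : List Int) (mm : Option Int) (inv : List Int) : Bool :=
  match mm with
  | some m => decide (m < maxNE (inv.map (fun note => minDist note prev)))
  | none => false

-- common normal form of both loop bodies
def cstep (prev : List Int) (mm : Option Int) (st : List Int × Option Int) (inv : List Int) : List Int × Option Int :=
  if skipB prev mm inv then st
  else
    let movement := (inv.map (fun note => minDist note prev)).sum
    match st.2 with
    | none => (inv, some movement)
    | some mv => if movement < mv then (inv, some movement) else st

theorem fcvStep_eq_cstep (prev : List Int) (mm : Option Int) (hprev : prev ≠ []) :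
    fcvStep prev mm = cstep prev mm := by
  funext st inv
  simp [fcvStep, cstep, skipB, hprev, PySem.List.foldl_add]

theorem altStep_eq_cstep (ct prev : List Int) (mm : Option Int) (hct : ct ≠ []) :
    fcvAltStep ct prev mm = fun st off => cstep prev mm st (ct.map (fun n => n + off)) := by
  funext st off
  have hie : ct.isEmpty = false := by simp [hct]
  simp [fcvAltStep, cstep, skipB, List.map_map, Function.comp_def, hie]

theorem lt_foldl_max (m : Int) (ds : List Int) : ∀ d : Int, m < ds.foldl max d ↔ m < d ∨ ∃ x ∈ ds, m < x := by
  induction ds with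
  | nil => simp
  | cons e es ih => intro d; simp [List.foldl_cons, ih (max d e), or_assoc]

theorem lt_maxNE_map (m : Int) (f : Int → Int) (l : List Int) (hl : l ≠ []) :
    m < maxNE (l.map f) ↔ ∃ n ∈ l, m < f n := by
  cases l with
  | nil => exact absurd rfl hl
  | cons x xs => simp [maxNE, lt_foldl_max, List.mem_map]

theorem skipB_perm (prev : List Int) (mm : Option Int) {l₁ l₂ : List Int} (h : l₁.Perm l₂) :
    skipB prev mm l₁ = skipB prev mm l₂ := by
  cases mm with
  | none => rfl
  | some m =>
    by_cases h1 : l₁ = []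
    · subst h1
      have h2 : l₂ = [] := h.nil_eq.symm
      subst h2; rfl
    · have h2 : l₂ ≠ [] := fun he => h1 (by subst he; exact h.eq_nil)
      simp only [skipB]
      rw [decide_eq_decide, lt_maxNE_map m _ _ h1, lt_maxNE_map m _ _ h2]
      constructor
      · rintro ⟨n, hn, hlt⟩; exact ⟨n, h.mem_iff.mp hn, hlt⟩
      · rintro ⟨n, hn, hlt⟩; exact ⟨n, h.mem_iff.mpr hn, hlt⟩

-- movement of a candidate
def Mv (prev : List Int) (inv : List Int) : Int := (inv.map (fun note => minDist note prev)).sum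

theorem Mv_perm (prev : List Int) {l₁ l₂ : List Int} (h : l₁.Perm l₂) : Mv prev l₁ = Mv prev l₂ :=
  (h.map _).sum_eq

-- the fold's running minimum never increases
theorem cstep_mono (prev : List Int) (mm : Option Int) (st : List Int × Option Int) (inv : List Int)
    (mv : Int) (h : st.2 = some mv) :
    ∃ mv', (cstep prev mm st inv).2 = some mv' ∧ mv' ≤ mv := by
  obtain ⟨b, m⟩ := st
  replace h : m = some mv := h
  subst h
  unfold cstep
  split
  · exact ⟨mv, rfl, le_refl mv⟩
  · dsimp only
    split
    · exact ⟨_, rfl, le_of_lt (by assumption)⟩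
    · exact ⟨mv, rfl, le_refl mv⟩

theorem foldl_cstep_mono (prev : List Int) (mm : Option Int) (L : List (List Int)) :
    ∀ (st : List Int × Option Int) (mv : Int), st.2 = some mv →
    ∃ mv', (L.foldl (cstep prev mm) st).2 = some mv' ∧ mv' ≤ mv := by
  induction L with
  | nil => intro st mv h; exact ⟨mv, h, le_refl mv⟩
  | cons l L ih =>
    intro st mv h
    obtain ⟨m1, h1, hle1⟩ := cstep_mono prev mm st l mv h
    obtain ⟨m2, h2, hle2⟩ := ih (cstep prev mm st l) m1 h1
    exact ⟨m2, by simpa using h2, le_trans hle2 hle1⟩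

-- after an unskipped candidate, the minimum is at most its movement
theorem cstep_establish (prev : List Int) (mm : Option Int) (st : List Int × Option Int) (inv : List Int)
    (h : skipB prev mm inv = false) :
    ∃ mv, (cstep prev mm st inv).2 = some mv ∧ mv ≤ Mv prev inv := by
  obtain ⟨b, m⟩ := st
  unfold cstep
  rw [h]
  simp only [Bool.false_eq_true, if_false]
  cases m with
  | none => exact ⟨_, rfl, le_refl _⟩
  | some mv' =>
    dsimp only
    split
    · exact ⟨_, rfl, le_refl _⟩
    · refine ⟨mv', rfl, ?_⟩
      unfold Mv
      rename_i hnlt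
      omega

-- st "covers" L: for every unskipped candidate of L the minimum is ≤ its movement
def Covers (prev : List Int) (mm : Option Int) (st : List Int × Option Int) (L : List (List Int)) : Prop :=
  ∀ l ∈ L, skipB prev mm l = false → ∃ mv, st.2 = some mv ∧ mv ≤ Mv prev l

theorem covers_foldl (prev : List Int) (mm : Option Int) (L : List (List Int)) :
    ∀ st : List Int × Option Int, Covers prev mm (L.foldl (cstep prev mm) st) L := by
  induction L with
  | nil => intro st l hl; exact absurd hl (by simp)
  | cons l L ih =>
    intro st l' hl' hskip
    rcases List.mem_cons.mp hl' with rfl | hl'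
    · obtain ⟨m1, h1, hle1⟩ := cstep_establish prev mm st l' hskip
      obtain ⟨m2, h2, hle2⟩ := foldl_cstep_mono prev mm L (cstep prev mm st l') m1 h1
      exact ⟨m2, by simpa using h2, le_trans hle2 hle1⟩
    · exact ih (cstep prev mm st l) l' hl' hskip

-- a candidate permutation-equivalent to a covered one is absorbed
theorem cstep_absorb (prev : List Int) (mm : Option Int) (st : List Int × Option Int) (L0 : List (List Int))
    (hcov : Covers prev mm st L0) (l' l₀ : List Int) (hmem : l₀ ∈ L0) (hperm : l'.Perm l₀) :
    cstep prev mm st l' = st := by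
  unfold cstep
  split
  · rfl
  · rename_i hskip
    have hskip' : skipB prev mm l₀ = false := by
      rw [← skipB_perm prev mm hperm]; simpa using hskip
    obtain ⟨mv, hst, hle⟩ := hcov l₀ hmem hskip'
    obtain ⟨b, m⟩ := st
    replace hst : m = some mv := hst
    subst hst
    dsimp only
    have hnlt : ¬ ((l'.map (fun note => minDist note prev)).sum < mv) := by
      have := Mv_perm prev hperm
      unfold Mv at this hle
      omega
    rw [if_neg hnlt]

theorem foldl_cstep_absorb (prev : List Int) (mm : Option Int) (st : List Int × Option Int) (L0 : List (List Int))
    (hcov : Covers prev mm st L0) (L' : List (List Int))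
    (hmir : ∀ l' ∈ L', ∃ l₀ ∈ L0, l'.Perm l₀) :
    L'.foldl (cstep prev mm) st = st := by
  induction L' with
  | nil => rfl
  | cons l L ih =>
    obtain ⟨l₀, hl₀, hperm⟩ := hmir l List.mem_cons_self
    rw [List.foldl_cons, cstep_absorb prev mm st L0 hcov l l₀ hl₀ hperm]
    exact ih (fun x hx => hmir x (List.mem_cons_of_mem _ hx))

-- the group of candidates A generates for one rotation
def rotOf (ct : List Int) (r : Int) : List Int :=
  PySem.List.slice ct (some r) none ++ PySem.List.slice ct none (some r)

def groupOf (ct : List Int) (aw : Bool) (r : Int) : List (List Int) :=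
  if aw then [rotOf ct r, (rotOf ct r).map (fun n => n + 12), (rotOf ct r).map (fun n => n - 12)]
  else [rotOf ct r]

theorem rotOf_zero (ct : List Int) : rotOf ct 0 = ct := by
  unfold rotOf
  rw [PySem.List.slice_zero_start, PySem.List.slice_none_none,
      show (0 : Int) = ((0 : Nat) : Int) from rfl, PySem.List.slice_to_natCast]
  simp

theorem rotOf_perm (ct : List Int) (r : Int) (hr : 0 ≤ r) : (rotOf ct r).Perm ct := by
  unfold rotOf
  rw [show r = ((r.toNat : Nat) : Int) from (Int.toNat_of_nonneg hr).symm,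
      PySem.List.slice_from_natCast, PySem.List.slice_to_natCast]
  calc (List.drop r.toNat ct ++ List.take r.toNat ct).Perm
        (List.take r.toNat ct ++ List.drop r.toNat ct) := List.perm_append_comm
    _ = ct := List.take_append_drop _ _

theorem group_mirror (ct : List Int) (aw : Bool) (r : Int) (hr : 0 ≤ r) :
    ∀ l' ∈ groupOf ct aw r, ∃ l₀ ∈ groupOf ct aw 0, l'.Perm l₀ := by
  have hperm := rotOf_perm ct r hr
  intro l' hl'
  cases aw <;> simp only [groupOf, if_true, if_false, Bool.false_eq_true,
    rotOf_zero, List.mem_cons, List.not_mem_nil, or_false] at hl' ⊢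
  · exact ⟨ct, rfl, hl' ▸ hperm⟩
  · rcases hl' with rfl | rfl | rfl
    · exact ⟨ct, Or.inl rfl, hperm⟩
    · exact ⟨ct.map (fun n => n + 12), Or.inr (Or.inl rfl), hperm.map _⟩
    · exact ⟨ct.map (fun n => n - 12), Or.inr (Or.inr rfl), hperm.map _⟩

-- absorbing every later rotation group leaves the state unchanged
theorem foldl_groups_absorb (prev : List Int) (mm : Option Int) (ct : List Int) (aw : Bool)
    (S0 : List Int × Option Int) (hcov : Covers prev mm S0 (groupOf ct aw 0)) :
    ∀ rs : List Int, (∀ r ∈ rs, 0 ≤ r) →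
    rs.foldl (fun st r => (groupOf ct aw r).foldl (cstep prev mm) st) S0 = S0 := by
  intro rs
  induction rs with
  | nil => intro _; rfl
  | cons r rs ih =>
    intro h
    rw [List.foldl_cons,
        foldl_cstep_absorb prev mm S0 (groupOf ct aw 0) hcov (groupOf ct aw r)
          (group_mirror ct aw r (h r List.mem_cons_self))]
    exact ih (fun x hx => h x (List.mem_cons_of_mem _ hx))

-- A's inversions list is the concatenation of the rotation groups
theorem addInversions_eq (ct : List Int) (aw : Bool) :
    fcvAddInversions ct aw = fun acc r => acc ++ groupOf ct aw r := by
  funext acc r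
  cases aw <;> simp [fcvAddInversions, groupOf, rotOf]

-- ===== VERDICT (by name: the statement is the Claim_ definition above) =====
theorem find_closest_voicing_spec : Claim_equal_find_closest_voicing := by
  unfold Claim_equal_find_closest_voicing
  intro ct pv mm aw _
  unfold Spec_find_closest_voicing
  cases pv with
  | none => rfl
  | some prev =>
    by_cases hprev : prev = []
    · simp [find_closest_voicing, find_closest_voicing_alt, hprev]
    · by_cases hct : ct = []
      · subst hct
        cases aw <;> cases mm <;>
          simp [find_closest_voicing, find_closest_voicing_alt, fcvAltStep, hprev]
      · -- main case
        have hn : (0 : Int) < (ct.length : Int) := by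
          have : 0 < ct.length := List.length_pos_iff.mpr hct
          exact_mod_cast this
        have hA : find_closest_voicing ct (some prev) mm aw
            = ((PySem.List.pyRange 1 (ct.length : Int)).foldl
                (fun st r => (groupOf ct aw r).foldl (cstep prev mm) st)
                ((groupOf ct aw 0).foldl (cstep prev mm) (ct, none))).1 := by
          simp only [find_closest_voicing, hprev, reduceIte]
          rw [addInversions_eq ct aw, PySem.List.foldl_append_eq_flatMap, List.nil_append,
              fcvStep_eq_cstep prev mm hprev, List.foldl_flatMap,
              PySem.List.pyRange_one_cons hn, List.foldl_cons]
          norm_num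
        have hcov : Covers prev mm ((groupOf ct aw 0).foldl (cstep prev mm) (ct, none)) (groupOf ct aw 0) :=
          covers_foldl prev mm (groupOf ct aw 0) (ct, none)
        have habs := foldl_groups_absorb prev mm ct aw _ hcov
          (PySem.List.pyRange 1 (ct.length : Int))
          (fun r hr => by have := (PySem.List.mem_pyRange_one).mp hr; omega)
        have hB : find_closest_voicing_alt ct (some prev) mm aw
            = ((groupOf ct aw 0).foldl (cstep prev mm) (ct, none)).1 := by
          simp only [find_closest_voicing_alt, hprev, reduceIte]
          rw [altStep_eq_cstep ct prev mm hct]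
          cases aw <;>
            simp [groupOf, rotOf_zero, sub_eq_add_neg]
        rw [hA, habs, hB]
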